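-- pv_equiv track=rewrite | github.com/DiggsPapu/TeoriaComputacion | cyk_implementacion.py | cyk
-- ===== SOURCE A (Python) =====
-- def cyk(grammar, sentence):
--     n = len(sentence)
--     num_rules = len(grammar)
--
--     # Inicializamos la tabla CYK
--     table = [[set() for _ in range(n)] for _ in range(n)]
--
--     # Llenamos la diagonal de la tabla con las reglas de producción correspondientes a las palabras
--     for i in range(n):
--         for rule, productions in grammar.items():
--             if sentence[i] in productions:
--                 table[i][i].add(rule)
--
--     # Completamos la tabla usando la regla CYK
--     for length in range(2, n + 1):
--         for i in range(n - length + 1):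
--             j = i + length - 1
--             for k in range(i, j):
--                 for rule, productions in grammar.items():
--                     for prod in productions:
--                         if len(prod.split()) == 2 and prod.split()[0] in table[i][k] and prod.split()[1] in table[k+1][j]:
--                             table[i][j].add(rule)
--
--     # Verificamos si la oración pertenece a la gramática
--     return 'S' in table[0][n-1]
-- ===== SOURCE B (Python) =====
-- def cyk(grammar, sentence):
--     n = len(sentence)
--
--     # index terminal productions once: raw production string -> rules producing it
--     lex = {}
--     for rule, productions in grammar.items():
--         for prod in productions:
--             lex.setdefault(prod, []).append(rule)
--
--     # index binary productions once by their (left, right) symbol pair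
--     binidx = {}
--     for rule, productions in grammar.items():
--         for prod in productions:
--             parts = prod.split()
--             if len(parts) == 2:
--                 binidx.setdefault((parts[0], parts[1]), []).append(rule)
--
--     # sparse chart keyed by (i, j); missing cell = empty set
--     cells = {}
--     for i in range(n):
--         cells[(i, i)] = set(lex.get(sentence[i], []))
--
--     for length in range(2, n + 1):
--         for i in range(n - length + 1):
--             j = i + length - 1
--             cell = cells.setdefault((i, j), set())
--             for k in range(i, j):
--                 for x in cells.get((i, k), set()):
--                     for y in cells.get((k + 1, j), set()):
--                         cell.update(binidx.get((x, y), []))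
--
--     return n > 0 and 'S' in cells.get((0, n - 1), set())
-- ===== Notes on version B (the rewrite author's own statement) =====
-- stated objective: faster
-- what changed: B pre-splits productions once into a word->rules map and a (left,right)-pair->rules index, then fills each CYK cell by iterating over the symbols present in the two sub-cells and looking up the pair index, instead of rescanning the whole grammar and re-splitting every production for every (i,j,k).
-- outside the precondition, e.g. on cyk({'S': ['a']}, []): A raises IndexError, B returns False
import Mathlib
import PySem

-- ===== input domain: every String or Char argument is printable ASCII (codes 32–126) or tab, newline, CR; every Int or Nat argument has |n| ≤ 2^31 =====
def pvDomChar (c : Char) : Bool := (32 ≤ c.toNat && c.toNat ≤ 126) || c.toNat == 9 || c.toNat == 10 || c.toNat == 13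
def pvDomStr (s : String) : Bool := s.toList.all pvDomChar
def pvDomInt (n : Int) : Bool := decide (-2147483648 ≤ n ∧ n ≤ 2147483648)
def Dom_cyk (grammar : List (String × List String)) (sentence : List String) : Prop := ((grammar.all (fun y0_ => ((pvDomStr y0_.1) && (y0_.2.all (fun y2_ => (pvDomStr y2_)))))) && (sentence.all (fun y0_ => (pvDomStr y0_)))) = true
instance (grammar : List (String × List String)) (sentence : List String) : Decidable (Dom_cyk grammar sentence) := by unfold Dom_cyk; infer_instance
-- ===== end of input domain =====

-- B indexes the grammar once (word -> rules, (left,right) pair -> rules) and fills each CYK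
-- cell by iterating over the symbols already in the two sub-cells instead of rescanning the
-- whole grammar and re-splitting every production for every (i,j,k); objective: faster.

-- ===== PORT A =====

-- A's filled CYK table, as a chart keyed by (i, j) with empty default (models the Python
-- list-of-lists of sets: A touches exactly the in-range cells);  length = L+2, j = i+L+1, k = i+dk
def pvTabA (grammar : List (String × List String)) (sentence : List String) :
    PySem.Dict (Nat × Nat) (PySem.Set String) :=
  let n := sentence.length
  -- sentence[i] is in range for i < n, so getD is exact
  -- the diagonal cell is a fresh empty set when row i is reached (each (i, i) is written once)
  let t1 := (List.range n).foldl (fun t i =>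
      t.insert (i, i) (grammar.foldl (fun c rp =>
        if sentence.getD i "" ∈ rp.2 then PySem.Set.add c rp.1 else c) PySem.Set.empty)) PySem.Dict.empty
  (List.range (n - 1)).foldl (fun t L =>
      (List.range (n - (L + 2) + 1)).foldl (fun t i =>
        let j := i + L + 1
        t.insert (i, j) ((List.range (L + 1)).foldl (fun c dk =>
          let k := i + dk
          grammar.foldl (fun c rp =>
            rp.2.foldl (fun c prod =>
              let parts := PySem.Str.split₀ prod
              if parts.length = 2 ∧ parts.getD 0 "" ∈ t.getD (i, k) PySem.Set.empty ∧
                 parts.getD 1 "" ∈ t.getD (k + 1, j) PySem.Set.empty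
              then PySem.Set.add c rp.1 else c) c) c) (t.getD (i, j) PySem.Set.empty))) t) t1

def cyk (grammar : List (String × List String)) (sentence : List String) : Bool :=
  PySem.Set.contains ((pvTabA grammar sentence).getD (0, sentence.length - 1) PySem.Set.empty) "S"

-- ===== PORT B =====

-- lex: raw production string -> rules producing it (setdefault(prod, []).append(rule))
def pvLex (grammar : List (String × List String)) : PySem.Dict String (List String) :=
  grammar.foldl (fun d rp =>
    rp.2.foldl (fun d prod => d.insert prod (d.getD prod [] ++ [rp.1])) d) PySem.Dict.empty

-- binidx: (left, right) symbol pair of a binary production -> rules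
def pvBinidx (grammar : List (String × List String)) : PySem.Dict (String × String) (List String) :=
  grammar.foldl (fun d rp =>
    rp.2.foldl (fun d prod =>
      match PySem.Str.split₀ prod with
      | [x, y] => d.insert (x, y) (d.getD (x, y) [] ++ [rp.1])
      | _ => d) d) PySem.Dict.empty

-- B's sparse chart keyed by (i, j): diagonal from lex, inner cells from the two sub-cells and binidx
def pvTabB (grammar : List (String × List String)) (sentence : List String) :
    PySem.Dict (Nat × Nat) (PySem.Set String) :=
  let n := sentence.length
  let lex := pvLex grammar
  let binidx := pvBinidx grammar
  let t1 := (List.range n).foldl (fun t i =>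
      t.insert (i, i) ((lex.getD (sentence.getD i "") []).foldl PySem.Set.add PySem.Set.empty)) PySem.Dict.empty
  (List.range (n - 1)).foldl (fun t L =>
      (List.range (n - (L + 2) + 1)).foldl (fun t i =>
        let j := i + L + 1
        t.insert (i, j) ((List.range (L + 1)).foldl (fun c dk =>
          let k := i + dk
          (t.getD (i, k) PySem.Set.empty).foldl (fun c x =>
            (t.getD (k + 1, j) PySem.Set.empty).foldl (fun c y =>
              (binidx.getD (x, y) []).foldl PySem.Set.add c) c) c) (t.getD (i, j) PySem.Set.empty))) t) t1

def cyk_alt (grammar : List (String × List String)) (sentence : List String) : Bool :=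
  decide (0 < sentence.length) &&
    PySem.Set.contains ((pvTabB grammar sentence).getD (0, sentence.length - 1) PySem.Set.empty) "S"

-- ===== PRECONDITION & SPEC =====
-- Pre_ excludes the empty sentence, on which A raises IndexError (table[0][-1] of an empty
-- table), and association lists with duplicate keys, which have no faithful counterpart as a
-- Python dict argument (dict construction silently collapses duplicate entries).
def Pre_cyk (grammar : List (String × List String)) (sentence : List String) : Prop :=
  (grammar.map Prod.fst).Nodup ∧ sentence ≠ []
instance (grammar : List (String × List String)) (sentence : List String) : Decidable (Pre_cyk grammar sentence) := by unfold Pre_cyk; infer_instance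

def pvWitness_cyk : (List (String × List String)) × List String :=
  ([("S", ["A B", "a"]), ("A", ["a"]), ("B", ["b"])], ["a", "b"])

def Spec_cyk (grammar : List (String × List String)) (sentence : List String) (out : Bool) : Prop := out = cyk_alt grammar sentence
instance (grammar : List (String × List String)) (sentence : List String) (out : Bool) : Decidable (Spec_cyk grammar sentence out) := by unfold Spec_cyk; infer_instance

-- ===== CLAIM (what is proved, stated in full; the proofs are below) =====
def Claim_equal_cyk : Prop := ∀ (grammar : List (String × List String)) (sentence : List String), Dom_cyk grammar sentence → Pre_cyk grammar sentence → Spec_cyk grammar sentence (cyk grammar sentence)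

-- ===== LEMMAS AND PROOFS =====

-- membership through a fold whose step either adds one element or leaves the set unchanged
theorem pv_mem_foldl {σ : Type} (r : String) (f : PySem.Set String → σ → PySem.Set String)
    (Q : σ → Prop) (hf : ∀ c x, r ∈ f c x ↔ r ∈ c ∨ Q x) :
    ∀ (l : List σ) (c : PySem.Set String), r ∈ List.foldl f c l ↔ r ∈ c ∨ ∃ x ∈ l, Q x := by
  intro l
  induction l with
  | nil => simp
  | cons a l ih =>
    intro c
    simp only [List.foldl_cons, ih, hf, List.mem_cons]
    aesop

-- two folds over the same list preserve a relation preserved by their steps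
theorem pv_foldl_rel {α β γ : Type} (R : α → β → Prop) (f : α → γ → α) (g : β → γ → β)
    (h : ∀ a b c, R a b → R (f a c) (g b c)) :
    ∀ (l : List γ) (a : α) (b : β), R a b → R (List.foldl f a l) (List.foldl g b l) := by
  intro l
  induction l with
  | nil => intro a b hr; exact hr
  | cons x l ih => intro a b hr; exact ih _ _ (h _ _ _ hr)

theorem pv_mem_addAll (l : List String) (r : String) (c : PySem.Set String) :
    r ∈ List.foldl PySem.Set.add c l ↔ r ∈ c ∨ r ∈ l := by
  rw [pv_mem_foldl r PySem.Set.add (fun x => x = r)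
      (fun c x => by rw [PySem.Set.mem_add]; tauto)]
  simp

theorem pv_lex_inner (rule w r : String) :
    ∀ (prods : List String) (d : PySem.Dict String (List String)),
      r ∈ (List.foldl (fun d prod => d.insert prod (d.getD prod [] ++ [rule])) d prods).getD w []
        ↔ r ∈ d.getD w [] ∨ (r = rule ∧ w ∈ prods) := by
  intro prods
  induction prods with
  | nil => simp
  | cons p ps ih =>
    intro d
    simp only [List.foldl_cons, ih, PySem.Dict.getD_insert, List.mem_cons]
    by_cases hw : w = p
    · simp [hw] <;> tauto
    · simp [hw] <;> tauto

theorem pv_lex_mem (grammar : List (String × List String)) (w r : String) :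
    r ∈ (pvLex grammar).getD w [] ↔ ∃ p ∈ grammar, p.1 = r ∧ w ∈ p.2 := by
  have main : ∀ (g : List (String × List String)) (d : PySem.Dict String (List String)),
      r ∈ (List.foldl (fun d rp =>
            rp.2.foldl (fun d prod => d.insert prod (d.getD prod [] ++ [rp.1])) d) d g).getD w []
        ↔ r ∈ d.getD w [] ∨ ∃ p ∈ g, p.1 = r ∧ w ∈ p.2 := by
    intro g
    induction g with
    | nil => simp
    | cons rp g ih =>
      intro d
      simp only [List.foldl_cons, ih, pv_lex_inner, List.mem_cons]
      constructor
      · rintro ((h | ⟨hr, hw⟩) | ⟨p, hp, h1, h2⟩)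
        · exact Or.inl h
        · exact Or.inr ⟨rp, Or.inl rfl, hr.symm, hw⟩
        · exact Or.inr ⟨p, Or.inr hp, h1, h2⟩
      · rintro (h | ⟨p, (rfl | hp), h1, h2⟩)
        · exact Or.inl (Or.inl h)
        · exact Or.inl (Or.inr ⟨h1.symm, h2⟩)
        · exact Or.inr ⟨p, hp, h1, h2⟩
  have := main grammar PySem.Dict.empty
  simpa [pvLex, PySem.Dict.getD, PySem.Dict.get?, PySem.Dict.empty] using this

theorem pv_bin_inner (rule : String) (x y r : String) :
    ∀ (prods : List String) (d : PySem.Dict (String × String) (List String)),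
      r ∈ (List.foldl (fun d prod =>
            match PySem.Str.split₀ prod with
            | [a, b] => d.insert (a, b) (d.getD (a, b) [] ++ [rule])
            | _ => d) d prods).getD (x, y) []
        ↔ r ∈ d.getD (x, y) [] ∨ (r = rule ∧ ∃ prod ∈ prods, PySem.Str.split₀ prod = [x, y]) := by
  intro prods
  induction prods with
  | nil => simp
  | cons p ps ih =>
    intro d
    simp only [List.foldl_cons, List.mem_cons]
    rcases hsp : PySem.Str.split₀ p with _ | ⟨a, _ | ⟨b, _ | ⟨c', rest⟩⟩⟩
    · simp only [ih]
      constructor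
      · rintro (h | ⟨hr, prod, hp, he⟩)
        · exact Or.inl h
        · exact Or.inr ⟨hr, prod, Or.inr hp, he⟩
      · rintro (h | ⟨hr, prod, (rfl | hp), he⟩)
        · exact Or.inl h
        · rw [hsp] at he; cases he
        · exact Or.inr ⟨hr, prod, hp, he⟩
    · simp only [ih]
      constructor
      · rintro (h | ⟨hr, prod, hp, he⟩)
        · exact Or.inl h
        · exact Or.inr ⟨hr, prod, Or.inr hp, he⟩
      · rintro (h | ⟨hr, prod, (rfl | hp), he⟩)
        · exact Or.inl h
        · rw [hsp] at he; cases he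
        · exact Or.inr ⟨hr, prod, hp, he⟩
    · simp only [ih, PySem.Dict.getD_insert]
      by_cases hk : (x, y) = (a, b)
      · injection hk with hx hy
        subst hx; subst hy
        rw [if_pos rfl]
        simp only [List.mem_append, List.mem_cons, List.not_mem_nil, or_false]
        constructor
        · rintro ((h | h) | ⟨hr, prod, hp, he⟩)
          · exact Or.inl h
          · exact Or.inr ⟨h, p, Or.inl rfl, hsp⟩
          · exact Or.inr ⟨hr, prod, Or.inr hp, he⟩
        · rintro (h | ⟨hr, prod, (rfl | hp), he⟩)
          · exact Or.inl (Or.inl h)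
          · exact Or.inl (Or.inr hr)
          · exact Or.inr ⟨hr, prod, hp, he⟩
      · rw [if_neg hk]
        constructor
        · rintro (h | ⟨hr, prod, hp, he⟩)
          · exact Or.inl h
          · exact Or.inr ⟨hr, prod, Or.inr hp, he⟩
        · rintro (h | ⟨hr, prod, (rfl | hp), he⟩)
          · exact Or.inl h
          · rw [hsp] at he
            injection he with h1 h2
            injection h2 with h3 _
            exact absurd (by rw [← h1, ← h3]) hk
          · exact Or.inr ⟨hr, prod, hp, he⟩
    · simp only [ih]
      constructor
      · rintro (h | ⟨hr, prod, hp, he⟩)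
        · exact Or.inl h
        · exact Or.inr ⟨hr, prod, Or.inr hp, he⟩
      · rintro (h | ⟨hr, prod, (rfl | hp), he⟩)
        · exact Or.inl h
        · rw [hsp] at he; cases he
        · exact Or.inr ⟨hr, prod, hp, he⟩

theorem pv_bin_mem (grammar : List (String × List String)) (x y r : String) :
    r ∈ (pvBinidx grammar).getD (x, y) []
      ↔ ∃ p ∈ grammar, p.1 = r ∧ ∃ prod ∈ p.2, PySem.Str.split₀ prod = [x, y] := by
  have main : ∀ (g : List (String × List String)) (d : PySem.Dict (String × String) (List String)),
      r ∈ (List.foldl (fun d rp =>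
            rp.2.foldl (fun d prod =>
              match PySem.Str.split₀ prod with
              | [a, b] => d.insert (a, b) (d.getD (a, b) [] ++ [rp.1])
              | _ => d) d) d g).getD (x, y) []
        ↔ r ∈ d.getD (x, y) [] ∨ ∃ p ∈ g, p.1 = r ∧ ∃ prod ∈ p.2, PySem.Str.split₀ prod = [x, y] := by
    intro g
    induction g with
    | nil => simp
    | cons rp g ih =>
      intro d
      simp only [List.foldl_cons, ih, pv_bin_inner, List.mem_cons]
      constructor
      · rintro ((h | ⟨hr, hw⟩) | ⟨p, hp, h1, h2⟩)
        · exact Or.inl h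
        · exact Or.inr ⟨rp, Or.inl rfl, hr.symm, hw⟩
        · exact Or.inr ⟨p, Or.inr hp, h1, h2⟩
      · rintro (h | ⟨p, (rfl | hp), h1, h2⟩)
        · exact Or.inl (Or.inl h)
        · exact Or.inl (Or.inr ⟨h1.symm, h2⟩)
        · exact Or.inr ⟨p, hp, h1, h2⟩
  have := main grammar PySem.Dict.empty
  simpa [pvBinidx, PySem.Dict.getD, PySem.Dict.get?, PySem.Dict.empty] using this

-- the diagonal cell built by A's grammar scan
theorem pv_mem_diagA (grammar : List (String × List String)) (w r : String) (c : PySem.Set String) :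
    r ∈ List.foldl (fun c rp => if w ∈ rp.2 then PySem.Set.add c rp.1 else c) c grammar
      ↔ r ∈ c ∨ ∃ p ∈ grammar, p.1 = r ∧ w ∈ p.2 := by
  rw [pv_mem_foldl r _ (fun p => p.1 = r ∧ w ∈ p.2)
      (fun c rp => by split_ifs with h <;> simp [PySem.Set.mem_add, h] <;> tauto)]

-- the cell contribution of one split point in A (grammar × productions scan)
theorem pv_mem_cellA (grammar : List (String × List String)) (Lc Rc : PySem.Set String)
    (r : String) (c : PySem.Set String) :
    r ∈ List.foldl (fun c rp =>
          List.foldl (fun c prod =>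
            if (PySem.Str.split₀ prod).length = 2 ∧ (PySem.Str.split₀ prod).getD 0 "" ∈ Lc ∧
               (PySem.Str.split₀ prod).getD 1 "" ∈ Rc
            then PySem.Set.add c rp.1 else c) c rp.2) c grammar
      ↔ r ∈ c ∨ ∃ p ∈ grammar, p.1 = r ∧ ∃ prod ∈ p.2,
          (PySem.Str.split₀ prod).length = 2 ∧ (PySem.Str.split₀ prod).getD 0 "" ∈ Lc ∧
          (PySem.Str.split₀ prod).getD 1 "" ∈ Rc := by
  rw [pv_mem_foldl r _
      (fun rp => rp.1 = r ∧ ∃ prod ∈ rp.2, (PySem.Str.split₀ prod).length = 2 ∧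
        (PySem.Str.split₀ prod).getD 0 "" ∈ Lc ∧ (PySem.Str.split₀ prod).getD 1 "" ∈ Rc)
      (fun c rp => by
        rw [pv_mem_foldl r _
            (fun prod => rp.1 = r ∧ (PySem.Str.split₀ prod).length = 2 ∧
              (PySem.Str.split₀ prod).getD 0 "" ∈ Lc ∧ (PySem.Str.split₀ prod).getD 1 "" ∈ Rc)
            (fun c prod => by split_ifs with h <;> simp [PySem.Set.mem_add] <;> tauto)]
        tauto)]

-- the cell contribution of one split point in B (sub-cell × sub-cell scan into binidx)
theorem pv_mem_cellB (binidx : PySem.Dict (String × String) (List String))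
    (Lc Rc : PySem.Set String) (r : String) (c : PySem.Set String) :
    r ∈ List.foldl (fun c x =>
          List.foldl (fun c y =>
            List.foldl PySem.Set.add c (binidx.getD (x, y) [])) c Rc) c Lc
      ↔ r ∈ c ∨ ∃ x ∈ Lc, ∃ y ∈ Rc, r ∈ binidx.getD (x, y) [] := by
  rw [pv_mem_foldl r _ (fun x => ∃ y ∈ Rc, r ∈ binidx.getD (x, y) [])
      (fun c x => by
        rw [pv_mem_foldl r _ (fun y => r ∈ binidx.getD (x, y) [])
            (fun c y => pv_mem_addAll _ r c)])]

-- bridge between A's per-production condition and B's per-symbol-pair lookup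
theorem pv_cond_bridge (grammar : List (String × List String))
    (LA RA LB RB : PySem.Set String)
    (hL : ∀ z, z ∈ LA ↔ z ∈ LB) (hR : ∀ z, z ∈ RA ↔ z ∈ RB) (r : String) :
    (∃ p ∈ grammar, p.1 = r ∧ ∃ prod ∈ p.2,
        (PySem.Str.split₀ prod).length = 2 ∧ (PySem.Str.split₀ prod).getD 0 "" ∈ LA ∧
        (PySem.Str.split₀ prod).getD 1 "" ∈ RA)
      ↔ (∃ x ∈ LB, ∃ y ∈ RB, r ∈ (pvBinidx grammar).getD (x, y) []) := by
  constructor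
  · rintro ⟨p, hp, h1, prod, hprod, hlen, hx, hy⟩
    obtain ⟨a, b, hab⟩ := List.length_eq_two.mp hlen
    rw [hab] at hx hy
    simp only [List.getD] at hx hy
    refine ⟨a, (hL a).mp (by simpa using hx), b, (hR b).mp (by simpa using hy), ?_⟩
    rw [pv_bin_mem]
    exact ⟨p, hp, h1, prod, hprod, hab⟩
  · rintro ⟨x, hx, y, hy, hmem⟩
    rw [pv_bin_mem] at hmem
    obtain ⟨p, hp, h1, prod, hprod, hsp⟩ := hmem
    exact ⟨p, hp, h1, prod, hprod, by rw [hsp]; exact ⟨rfl, by simpa using (hL x).mpr hx,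
      by simpa using (hR y).mpr hy⟩⟩

-- pointwise membership equality of the two charts
def pvInv (t t' : PySem.Dict (Nat × Nat) (PySem.Set String)) : Prop :=
  ∀ a b r, r ∈ t.getD (a, b) PySem.Set.empty ↔ r ∈ t'.getD (a, b) PySem.Set.empty

theorem pv_inv_upd (t t' : PySem.Dict (Nat × Nat) (PySem.Set String)) (a b : Nat)
    (s s' : PySem.Set String) (ht : pvInv t t') (hs : ∀ r, r ∈ s ↔ r ∈ s') :
    pvInv (t.insert (a, b) s) (t'.insert (a, b) s') := by
  intro x y r
  rw [PySem.Dict.getD_insert, PySem.Dict.getD_insert]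
  split_ifs with h
  · exact hs r
  · exact ht x y r

theorem pv_tables (grammar : List (String × List String)) (sentence : List String) :
    pvInv (pvTabA grammar sentence) (pvTabB grammar sentence) := by
  unfold pvTabA pvTabB
  apply pv_foldl_rel pvInv
  · -- one length/i/k pass preserves the invariant
    intro t t' L ht
    apply pv_foldl_rel pvInv
    · intro t t' i ht
      apply pv_inv_upd _ _ _ _ _ _ ht
      intro r
      apply (pv_foldl_rel (fun (c c' : PySem.Set String) => ∀ r, r ∈ c ↔ r ∈ c') _ _ ?_
        (List.range (L + 1)) _ _ (fun r => ht i (i + L + 1) r)) r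
      intro c c' dk hc r
      rw [pv_mem_cellA, pv_mem_cellB, hc r,
        pv_cond_bridge grammar _ _ _ _ (fun z => ht i (i + dk) z) (fun z => ht (i + dk + 1) (i + L + 1) z) r]
    · exact ht
  · -- the diagonal pass establishes the invariant
    apply pv_foldl_rel pvInv
    · intro t t' i ht
      apply pv_inv_upd _ _ _ _ _ _ ht
      intro r
      rw [pv_mem_diagA, pv_mem_addAll, pv_lex_mem]
    · intro a b r; exact Iff.rfl

-- ===== VERDICT (by name: the statement is the Claim_ definition above) =====
theorem cyk_spec : Claim_equal_cyk := by
  intro grammar sentence _ hpre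
  unfold Spec_cyk cyk cyk_alt
  have hn : 0 < sentence.length := List.length_pos_iff.mpr hpre.2
  rw [decide_eq_true hn, Bool.true_and]
  have h := pv_tables grammar sentence 0 (sentence.length - 1) "S"
  simp only [PySem.Set.contains]
  simp only [PySem.Set.empty] at h
  simp [h]
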